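-- pv_equiv track=rewrite | github.com/marcelmuslija/aoc-2024 | day09/solution.py | find_leftmost_fit
-- ===== SOURCE A (Python) =====
-- def find_leftmost_fit(disk, file_length):
--     free_size = 0
--     for i, c in enumerate(disk):
--         if c == '.':
--             free_size += 1
--             if free_size >= file_length:
--                 return i-free_size+1
--         else:
--             free_size = 0
--
--     return -1
-- ===== SOURCE B (Python) =====
-- def find_leftmost_fit(disk, file_length):
--     # Phase 1: collect the maximal runs of free space as (start, length) pairs.
--     runs = []
--     start = None
--     for i, c in enumerate(disk):
--         if c == '.':
--             if start is None:
--                 start = i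
--         elif start is not None:
--             runs.append((start, i - start))
--             start = None
--     if start is not None:
--         runs.append((start, len(disk) - start))
--     # Phase 2: first run long enough wins.
--     for s, length in runs:
--         if length >= file_length:
--             return s
--     return -1
-- ===== Notes on version B (the rewrite author's own statement) =====
-- stated objective: alternative
-- what changed: B first materialises the maximal runs of free space as (start,length) pairs in one pass and then returns the start of the first run whose full length suffices, instead of counting dots incrementally and returning mid-scan.
import Mathlib
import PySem

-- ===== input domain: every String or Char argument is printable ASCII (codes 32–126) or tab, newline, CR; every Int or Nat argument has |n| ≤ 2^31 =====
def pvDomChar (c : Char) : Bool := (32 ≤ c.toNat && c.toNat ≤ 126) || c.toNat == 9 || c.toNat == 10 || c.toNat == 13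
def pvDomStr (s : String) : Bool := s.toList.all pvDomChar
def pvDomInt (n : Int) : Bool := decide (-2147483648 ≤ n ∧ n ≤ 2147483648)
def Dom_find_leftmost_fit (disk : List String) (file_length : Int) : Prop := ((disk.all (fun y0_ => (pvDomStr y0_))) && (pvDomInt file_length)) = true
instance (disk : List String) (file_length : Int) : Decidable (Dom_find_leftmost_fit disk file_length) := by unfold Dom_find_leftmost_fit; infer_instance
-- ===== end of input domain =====

-- B enumerates maximal free runs and picks the first long enough; A counts dots incrementally and returns mid-scan. Return values proved equal on all inputs.

-- ===== PORT A =====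
-- the for-loop with early return: state = (current index i, free_size)
def flfLoopA (file_length : Int) : List String → Int → Int → Int
  | [], _, _ => -1
  | c :: rest, i, free_size =>
    if c == "." then
      let free_size := free_size + 1
      if free_size ≥ file_length then i - free_size + 1
      else flfLoopA file_length rest (i + 1) free_size
    else flfLoopA file_length rest (i + 1) 0

def find_leftmost_fit (disk : List String) (file_length : Int) : Int :=
  flfLoopA file_length disk 0 0

-- ===== PORT B =====
-- phase 1: collect maximal runs of '.' as (start, length) pairs; state = (index i, optional run start)
def flfRuns : List String → Int → Option Int → List (Int × Int)
  | [], _, none => []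
  | [], i, some s => [(s, i - s)]
  | c :: rest, i, st =>
    if c == "." then
      flfRuns rest (i + 1) (some (st.getD i))
    else
      match st with
      | none => flfRuns rest (i + 1) none
      | some s => (s, i - s) :: flfRuns rest (i + 1) none

-- phase 2: first run whose length suffices
def flfFirstFit (file_length : Int) : List (Int × Int) → Int
  | [] => -1
  | (s, len) :: rest => if len ≥ file_length then s else flfFirstFit file_length rest

def find_leftmost_fit_alt (disk : List String) (file_length : Int) : Int :=
  flfFirstFit file_length (flfRuns disk 0 none)

-- ===== PRECONDITION & SPEC =====
def Spec_find_leftmost_fit (disk : List String) (file_length : Int) (out : Int) : Prop := out = find_leftmost_fit_alt disk file_length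
instance (disk : List String) (file_length : Int) (out : Int) : Decidable (Spec_find_leftmost_fit disk file_length out) := by unfold Spec_find_leftmost_fit; infer_instance

-- ===== CLAIM (what is proved, stated in full; the proofs are below) =====
def Claim_equal_find_leftmost_fit : Prop := ∀ (disk : List String) (file_length : Int), Dom_find_leftmost_fit disk file_length → Spec_find_leftmost_fit disk file_length (find_leftmost_fit disk file_length)

-- ===== LEMMAS AND PROOFS =====

-- a run already at least file_length long is returned immediately, whatever follows
lemma flfFirstFit_runs_hit (file_length : Int) (rest : List String) (j s : Int)
    (h : j - s ≥ file_length) :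
    flfFirstFit file_length (flfRuns rest j (some s)) = s := by
  induction rest generalizing j with
  | nil => simp [flfRuns, flfFirstFit, h]
  | cons c rest ih =>
    by_cases hc : c == "."
    · simp only [flfRuns, hc, if_pos, Option.getD]
      exact ih (j + 1) (by omega)
    · simp [flfRuns, hc, flfFirstFit, h]

-- main invariant: A's loop state (i, free_size) corresponds to B's pending run some (i - free_size)
lemma flf_invariant (file_length : Int) (rest : List String) (i free_size : Int)
    (h0 : 0 ≤ free_size) (hlt : 0 < free_size → free_size < file_length) :
    flfLoopA file_length rest i free_size =
      flfFirstFit file_length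
        (flfRuns rest i (if free_size = 0 then none else some (i - free_size))) := by
  induction rest generalizing i free_size with
  | nil =>
    by_cases hz : free_size = 0
    · simp [flfLoopA, flfRuns, flfFirstFit, hz]
    · rw [if_neg hz]
      simp only [flfLoopA, flfRuns, flfFirstFit]
      split_ifs with h
    -- split_ifs: the pending run would have to be shorter than file_length
      · exfalso; have := hlt (by omega); omega
      · rfl
  | cons c rest ih =>
    by_cases hc : c == "."
    · have hst : (if free_size = 0 then (none : Option Int) else some (i - free_size)).getD i
          = i - free_size := by
        by_cases hz : free_size = 0 <;> simp [hz]
      simp only [flfLoopA, flfRuns, hc, if_pos, hst]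
      by_cases hret : free_size + 1 ≥ file_length
      · rw [if_pos hret,
          flfFirstFit_runs_hit file_length rest (i + 1) (i - free_size) (by omega)]
        omega
      · rw [if_neg hret]
        have heq : i + 1 - (free_size + 1) = i - free_size := by omega
        have := ih (i + 1) (free_size + 1) (by omega) (by omega)
        rw [if_neg (by omega), heq] at this
        exact this
    · by_cases hz : free_size = 0
      · have := ih (i + 1) 0 le_rfl (by omega)
        rw [if_pos rfl] at this
        simp only [flfLoopA, flfRuns, hc, hz, Bool.false_eq_true, if_false]
        exact this
      · have := ih (i + 1) 0 le_rfl (by omega)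
        rw [if_pos rfl] at this
        simp only [flfLoopA, flfRuns, hc, hz, Bool.false_eq_true, if_false,
          flfFirstFit]
        rw [if_neg (show ¬ (i - (i - free_size) ≥ file_length) by
          have := hlt (by omega); omega)]
        exact this

-- ===== VERDICT (by name: the statement is the Claim_ definition above) =====
theorem find_leftmost_fit_spec : Claim_equal_find_leftmost_fit := by
  intro disk file_length _
  unfold Spec_find_leftmost_fit find_leftmost_fit find_leftmost_fit_alt
  have := flf_invariant file_length disk 0 0 le_rfl (by omega)
  simpa using this
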